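-- pv_equiv track=rewrite | github.com/rgertenbach/aoc | 2023/day14/part2.py | part2
-- ===== SOURCE A (Python) =====
-- from collections import deque
--
-- ROUND = 'O'
--
-- EMPTY = '.'
--
-- def transpose(ss: list[list[str]]) -> list[list[str]]:
--   return [[*x] for x in zip(*ss)]
--
-- def count_series(ss: list[str]) -> deque[tuple[str, int]]:
--   counts = deque()
--   last = ss[0]
--   n = 1
--   for x in ss[1:]:
--     if x == last: n += 1
--     else:
--       counts.append((last, n))
--       n = 1
--       last = x
--   counts.append((last, n))
--   return counts
--
-- def roll(s: list[str]) -> list[str]: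
--   counts = count_series(s)
--   out = []
--   while counts:
--     x, freq = counts.popleft()
--     if x == EMPTY and counts and counts[0][0] == ROUND:
--       _, n_round = counts.popleft()
--       out.extend(ROUND * n_round)
--       if counts and counts[0][0] == EMPTY:
--         _, next_empty_freq = counts.popleft()
--         counts.appendleft((EMPTY, freq + next_empty_freq))
--       else: counts.appendleft((EMPTY, freq))
--     else:
--       out.extend(x * freq)
--   return out
--
-- def up(lines: list[list[str]]) -> list[list[str]]:
--   return transpose([roll(col) for col in transpose(lines)])
--
-- def down(lines: list[list[str]]) -> list[list[str]]:
--   return transpose([roll(col[::-1])[::-1] for col in transpose(lines)])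
--
-- def left(lines: list[list[str]]) -> list[list[str]]:
--   return [roll(col) for col in lines]
--
-- def right(lines: list[list[str]]) -> list[list[str]]:
--   return [roll(col[::-1])[::-1] for col in lines]
--
-- def cycle(lines: list[list[str]]) -> list[list[str]]:
--   return right(down(left(up(lines))))
--
-- def load(lines: list[list[str]]) -> int:
--   n = len(lines)
--   total = 0
--   for i, line in enumerate(lines):
--     total += (n - i) * sum(x == ROUND for x in line)
--   return total
--
-- def is_cycle(s: list[int], start: int, cycle_len: int) -> bool:
--   for i in range(cycle_len):
--     x = s[start + i]
--     off = 1
--     while (next_i := start + off * cycle_len + i) < len(s):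
--       if x != s[next_i]: return False
--       off += 1
--   return True
--
-- def detect_cycle(s: list[int]) -> tuple[int, int]:
--   for start in range(len(s)):
--     for cycle_len in range(1, len(s) // 2):
--       if is_cycle(s, start, cycle_len): return start, cycle_len
--   return -1, -1
--
-- def part2(lines: list[list[str]]) -> int:
--   "109325 is too high"
--
--   nth = 1_000_000_000
--   loads = []
--   for _ in range(1000):
--     lines = cycle(lines)
--     loads.append(load(lines))
--   cycle_offset, cycle_len = detect_cycle(loads)
--   loads = loads[cycle_offset:]
--   loads = loads[:cycle_len]
--   nth -= cycle_offset
--   return loads[nth % cycle_len - 1]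
-- ===== SOURCE B (Python) =====
-- ROUND = 'O'
-- EMPTY = '.'
--
-- def transpose(ss: list[list[str]]) -> list[list[str]]:
--   return [[*x] for x in zip(*ss)]
--
-- def roll(s: list[str]) -> list[str]:
--   # single pass with two counters: rounds gather at the front of each
--   # maximal 'O'/'.' block; any other cell is a barrier emitted as its chars
--   out = []
--   o = e = 0
--   for x in s:
--     if x == ROUND: o += 1
--     elif x == EMPTY: e += 1
--     else:
--       if o: out += [ROUND] * o; o = 0
--       if e: out += [EMPTY] * e; e = 0
--       out.extend(x)
--   if o: out += [ROUND] * o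
--   if e: out += [EMPTY] * e
--   return out
--
-- def up(lines: list[list[str]]) -> list[list[str]]:
--   return transpose([roll(col) for col in transpose(lines)])
--
-- def down(lines: list[list[str]]) -> list[list[str]]:
--   return transpose([roll(col[::-1])[::-1] for col in transpose(lines)])
--
-- def left(lines: list[list[str]]) -> list[list[str]]:
--   return [roll(col) for col in lines]
--
-- def right(lines: list[list[str]]) -> list[list[str]]:
--   return [roll(col[::-1])[::-1] for col in lines]
--
-- def cycle(lines: list[list[str]]) -> list[list[str]]:
--   return right(down(left(up(lines))))
--
-- def load(lines: list[list[str]]) -> int: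
--   n = len(lines)
--   total = 0
--   for i, line in enumerate(lines):
--     total += (n - i) * sum(x == ROUND for x in line)
--   return total
--
-- def detect_cycle(s: list[int]) -> tuple[int, int]:
--   # for each candidate period cl, one backward scan finds the least valid
--   # start; keep the (start, cl) with minimal start, then minimal cl
--   L = len(s)
--   best_start, best_cl = -1, -1
--   for cl in range(1, L // 2):
--     start = L - cl
--     kk = L - cl
--     while kk > 0:
--       k = kk - 1
--       if s[k] != s[k + cl]: break
--       start = k
--       kk = k
--     if best_cl == -1 or start < best_start:
--       best_start, best_cl = start, cl
--   return best_start, best_cl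
--
-- def part2(lines: list[list[str]]) -> int:
--   nth = 1_000_000_000
--   loads = []
--   for _ in range(1000):
--     lines = cycle(lines)
--     loads.append(load(lines))
--   start, cl = detect_cycle(loads)
--   return loads[start + (nth - start - 1) % cl]
-- ===== Notes on version B (the rewrite author's own statement) =====
-- stated objective: alternative
-- what changed: roll is rewritten as a single pass with round/empty counters flushed at each barrier cell (instead of run-length-encoding the line into a deque and rewriting it), and detect_cycle finds, for each candidate period, the least valid start with one backward scan and keeps the first period achieving the minimal start (instead of testing every (start, period) pair with a third inner offset loop), with the final load read directly at start + (nth - start - 1) % period.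
import Mathlib
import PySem

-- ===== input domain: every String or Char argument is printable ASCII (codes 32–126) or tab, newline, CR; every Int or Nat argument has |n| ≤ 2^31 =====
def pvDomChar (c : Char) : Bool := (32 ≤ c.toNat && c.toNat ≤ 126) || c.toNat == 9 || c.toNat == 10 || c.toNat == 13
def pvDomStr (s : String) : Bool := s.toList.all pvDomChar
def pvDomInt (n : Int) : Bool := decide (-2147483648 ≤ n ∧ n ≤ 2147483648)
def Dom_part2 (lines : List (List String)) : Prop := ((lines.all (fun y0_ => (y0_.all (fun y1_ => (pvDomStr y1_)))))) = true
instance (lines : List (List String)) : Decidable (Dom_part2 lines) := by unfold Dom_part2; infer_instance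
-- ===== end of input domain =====

-- B re-implements A's spin-cycle answer with a counter-based roll (one pass per line
-- instead of run-length-encoding into a deque and rewriting it) and a cycle detection
-- that takes one backward least-start scan per candidate period instead of A's nested
-- start/period/offset loops; same return value on every input.

-- ===== PORT A =====
-- shared helpers: `transpose` and `load` are textually identical in Source A and Source B
def pyTranspose (ss : List (List String)) : List (List String) :=
  match (ss.map List.length).min? with
  | none => []
  | some m => (List.range m).map (fun i => ss.map (fun r => r.getD i ""))

def gridLoad (lines : List (List String)) : Int :=
  (PySem.List.enumerate lines 0).foldl
    (fun total p =>
      total + ((lines.length : Int) - p.1) *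
        ((p.2.map (fun x => if x = "O" then (1 : Int) else 0)).sum)) 0

def charsOf (x : String) : List String := x.toList.map (fun c => String.ofList [c])

-- ===== PORT A =====
def csGo : List String → String → Nat → List (String × Nat) → List (String × Nat)
  | [], last, n, acc => acc ++ [(last, n)]
  | x :: xs, last, n, acc =>
    if x = last then csGo xs last (n + 1) acc
    else csGo xs x 1 (acc ++ [(last, n)])

-- count_series; Python raises IndexError on [] — unreachable from part2, [] branch is a totality guard
def countSeries (s : List String) : List (String × Nat) :=
  match s with
  | [] => []
  | x :: xs => csGo xs x 1 []

-- out.extend(x * freq): the characters of x, freq times, each as a 1-char string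
def strTimes (x : String) (f : Nat) : List String :=
  ((List.replicate f x.toList).flatten).map (fun c => String.ofList [c])

-- the while-loop over the deque inside roll
def rollRuns : List (String × Nat) → List String
  | [] => []
  | (x, f) :: rest =>
    if x = "." then
      match rest with
      | (y, n) :: rest2 =>
        if y = "O" then
          strTimes "O" n ++
            (match rest2 with
             | (z, m) :: rest3 =>
               if z = "." then rollRuns ((".", f + m) :: rest3)
               else rollRuns ((".", f) :: (z, m) :: rest3)
             | [] => rollRuns [(".", f)])
        else strTimes x f ++ rollRuns ((y, n) :: rest2)
      | [] => strTimes x f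
    else strTimes x f ++ rollRuns rest
termination_by rs => rs.length
decreasing_by all_goals simp

def rollA (s : List String) : List String :=
  match s with
  | [] => []
  | _ :: _ => rollRuns (countSeries s)

def upA (g : List (List String)) : List (List String) :=
  pyTranspose ((pyTranspose g).map rollA)

-- col[::-1] is List.reverse (PySem.List.slice?_none_none_neg_one)
def downA (g : List (List String)) : List (List String) :=
  pyTranspose ((pyTranspose g).map (fun col => (rollA col.reverse).reverse))

def leftA (g : List (List String)) : List (List String) := g.map rollA

def rightA (g : List (List String)) : List (List String) :=
  g.map (fun row => (rollA row.reverse).reverse)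

def cycleA (g : List (List String)) : List (List String) :=
  rightA (downA (leftA (upA g)))

def simA : Nat → List (List String) → List Int → List (List String) × List Int
  | 0, g, ls => (g, ls)
  | n + 1, g, ls => simA n (cycleA g) (ls ++ [gridLoad (cycleA g)])

-- the while-loop of is_cycle; cl = 0 would not terminate in Python either (guard)
def whileCheckA (s : List Int) (x : Int) (base cl : Nat) (off : Nat) : Option Bool :=
  if _hcl : cl = 0 then none
  else if _h : base + off * cl < s.length then
    match PySem.List.pyGet? s ((base + off * cl : Nat) : Int) with
    | none => none
    | some v => if x ≠ v then some false else whileCheckA s x base cl (off + 1)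
  else some true
termination_by s.length - (base + off * cl)
decreasing_by
  have hexp : (off + 1) * cl = off * cl + cl := by ring
  omega

def icGo (s : List Int) (start cl : Nat) (i : Nat) : Option Bool :=
  if i < cl then
    match PySem.List.pyGet? s ((start + i : Nat) : Int) with
    | none => none
    | some x =>
      match whileCheckA s x (start + i) cl 1 with
      | none => none
      | some false => some false
      | some true => icGo s start cl (i + 1)
  else some true
termination_by cl - i
decreasing_by omega

def clLoopA (s : List Int) (start : Nat) (cl : Nat) : Option (Option (Nat × Nat)) :=
  if cl < s.length / 2 then
    match icGo s start cl 0 with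
    | none => none
    | some true => some (some (start, cl))
    | some false => clLoopA s start (cl + 1)
  else some none
termination_by s.length / 2 - cl
decreasing_by omega

def stLoopA (s : List Int) (start : Nat) : Option (Int × Int) :=
  if start < s.length then
    match clLoopA s start 1 with
    | none => none
    | some (some (a, b)) => some ((a : Int), (b : Int))
    | some none => stLoopA s (start + 1)
  else some (-1, -1)
termination_by s.length - start
decreasing_by omega

def detectCycleA (s : List Int) : Option (Int × Int) := stLoopA s 0

def part2 (lines : List (List String)) : Int :=
  let loads := (simA 1000 lines []).2
  match detectCycleA loads with
  | none => 0   -- IndexError inside detect_cycle: provably unreachable on the 1000 loads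
  | some (co, cl) =>
    let l1 := PySem.List.slice loads (some co) none
    let l2 := PySem.List.slice l1 none (some cl)
    let nth : Int := 1000000000 - co
    (PySem.List.pyGet? l2 (PySem.Int.mod nth cl - 1)).getD 0

-- ===== PORT B =====
def rbGo : List String → Nat → Nat → List String → List String
  | [], o, e, out =>
    out ++ (if 0 < o then List.replicate o "O" else [])
        ++ (if 0 < e then List.replicate e "." else [])
  | x :: xs, o, e, out =>
    if x = "O" then rbGo xs (o + 1) e out
    else if x = "." then rbGo xs o (e + 1) out
    else rbGo xs 0 0 (out ++ (if 0 < o then List.replicate o "O" else [])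
        ++ (if 0 < e then List.replicate e "." else []) ++ charsOf x)

def rollB (s : List String) : List String := rbGo s 0 0 []

def upB (g : List (List String)) : List (List String) :=
  pyTranspose ((pyTranspose g).map rollB)

def downB (g : List (List String)) : List (List String) :=
  pyTranspose ((pyTranspose g).map (fun col => (rollB col.reverse).reverse))

def leftB (g : List (List String)) : List (List String) := g.map rollB

def rightB (g : List (List String)) : List (List String) :=
  g.map (fun row => (rollB row.reverse).reverse)

def cycleB (g : List (List String)) : List (List String) :=
  rightB (downB (leftB (upB g)))

def simB : Nat → List (List String) → List Int → List (List String) × List Int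
  | 0, g, ls => (g, ls)
  | n + 1, g, ls => simB n (cycleB g) (ls ++ [gridLoad (cycleB g)])

def msGo (s : List Int) (cl : Nat) : Nat → Nat → Nat
  | 0, start => start
  | kk + 1, start =>
    if s.getD kk 0 ≠ s.getD (kk + cl) 0 then start
    else msGo s cl kk kk

def detBGo (s : List Int) (cl : Nat) (best : Int × Int) : Int × Int :=
  if cl < s.length / 2 then
    let start := msGo s cl (s.length - cl) (s.length - cl)
    detBGo s (cl + 1)
      (if best.2 = -1 ∨ (start : Int) < best.1 then ((start : Int), (cl : Int)) else best)
  else best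
termination_by s.length / 2 - cl
decreasing_by omega

def detectCycleB (s : List Int) : Int × Int := detBGo s 1 (-1, -1)

def part2_alt (lines : List (List String)) : Int :=
  let loads := (simB 1000 lines []).2
  let sc := detectCycleB loads
  (PySem.List.pyGet? loads (sc.1 + PySem.Int.mod ((1000000000 : Int) - sc.1 - 1) sc.2)).getD 0


-- ===== PRECONDITION & SPEC =====
def Spec_part2 (lines : List (List String)) (out : Int) : Prop := out = part2_alt lines
instance (lines : List (List String)) (out : Int) : Decidable (Spec_part2 lines out) := by unfold Spec_part2; infer_instance

-- ===== CLAIM (what is proved, stated in full; the proofs are below) =====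
def Claim_equal_part2 : Prop := ∀ (lines : List (List String)), Dom_part2 lines → Spec_part2 lines (part2 lines)

-- ===== LEMMAS AND PROOFS =====
-- ----- roll: both implementations compute the same rolled line -----
def partCE : Nat → Nat → List String → List String
  | o, e, [] => List.replicate o "O" ++ List.replicate e "."
  | o, e, x :: xs =>
    if x = "O" then partCE (o + 1) e xs
    else if x = "." then partCE o (e + 1) xs
    else List.replicate o "O" ++ List.replicate e "." ++ charsOf x ++ partCE 0 0 xs

lemma repGuard (n : Nat) (x : String) :
    (if 0 < n then List.replicate n x else []) = List.replicate n x := by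
  cases n <;> simp

lemma rbGo_eq_partCE (xs : List String) : ∀ o e out, rbGo xs o e out = out ++ partCE o e xs := by
  induction xs with
  | nil => intro o e out; simp [rbGo, partCE, repGuard]
  | cons x t ih =>
    intro o e out
    by_cases h1 : x = "O"
    · simp [rbGo, partCE, h1, ih]
    · by_cases h2 : x = "."
      · simp [rbGo, partCE, h2, ih]
      · simp [rbGo, partCE, repGuard, h1, h2, ih]

lemma partCE_consO (o e : Nat) (t : List String) : partCE o e ("O" :: t) = partCE (o + 1) e t := by
  simp [partCE]

lemma partCE_consDot (o e : Nat) (t : List String) : partCE o e ("." :: t) = partCE o (e + 1) t := by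
  simp [partCE]

lemma partCE_consBar (o e : Nat) (x : String) (t : List String) (h1 : x ≠ "O") (h2 : x ≠ ".") :
    partCE o e (x :: t) = List.replicate o "O" ++ List.replicate e "." ++ charsOf x ++ partCE 0 0 t := by
  simp [partCE, h1, h2]

lemma partCE_repO (l : List String) : ∀ n o e, partCE o e (List.replicate n "O" ++ l) = partCE (o + n) e l := by
  intro n
  induction n with
  | zero => simp
  | succ k ih =>
    intro o e
    rw [List.replicate_succ, List.cons_append, partCE_consO, ih]
    ring_nf

lemma partCE_repDot (l : List String) : ∀ m o e, partCE o e (List.replicate m "." ++ l) = partCE o (e + m) l := by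
  intro m
  induction m with
  | zero => simp
  | succ k ih =>
    intro o e
    rw [List.replicate_succ, List.cons_append, partCE_consDot, ih]
    ring_nf

lemma partCE_pullO (l : List String) : ∀ o n e, partCE (o + n) e l = List.replicate n "O" ++ partCE o e l := by
  induction l with
  | nil =>
    intro o n e
    simp only [partCE]
    rw [Nat.add_comm o n, List.replicate_add, List.append_assoc]
  | cons x t ih =>
    intro o n e
    by_cases h1 : x = "O"
    · subst h1
      rw [partCE_consO, partCE_consO, show o + n + 1 = (o + 1) + n by ring, ih]
    · by_cases h2 : x = "."
      · subst h2
        rw [partCE_consDot, partCE_consDot, ih]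
      · rw [partCE_consBar _ _ _ _ h1 h2, partCE_consBar _ _ _ _ h1 h2]
        rw [Nat.add_comm o n, List.replicate_add]
        simp only [List.append_assoc]

lemma strTimes_succ (x : String) (f : Nat) : strTimes x (f + 1) = charsOf x ++ strTimes x f := by
  simp [strTimes, charsOf, List.replicate_succ]

lemma strTimes_O (n : Nat) : strTimes "O" n = List.replicate n "O" := by
  induction n with
  | zero => simp [strTimes]
  | succ k ih =>
    rw [strTimes_succ, ih, List.replicate_succ]
    rfl

lemma strTimes_dot (f : Nat) : strTimes "." f = List.replicate f "." := by
  induction f with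
  | zero => simp [strTimes]
  | succ k ih =>
    rw [strTimes_succ, ih, List.replicate_succ]
    rfl

lemma partCE_repBar (x : String) (h1 : x ≠ "O") (h2 : x ≠ ".") (l : List String) :
    ∀ f, partCE 0 0 (List.replicate f x ++ l) = strTimes x f ++ partCE 0 0 l := by
  intro f
  induction f with
  | zero => simp [strTimes]
  | succ k ih =>
    rw [List.replicate_succ, List.cons_append, partCE_consBar _ _ _ _ h1 h2, ih, strTimes_succ]
    simp

def flatRuns (rs : List (String × Nat)) : List String :=
  (rs.map (fun p => List.replicate p.2 p.1)).flatten

def noDD : List (String × Nat) → Prop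
  | (x, _) :: (y, m) :: rest => ¬(x = "." ∧ y = ".") ∧ noDD ((y, m) :: rest)
  | _ => True

lemma flatRuns_cons (x : String) (k : Nat) (rs : List (String × Nat)) :
    flatRuns ((x, k) :: rs) = List.replicate k x ++ flatRuns rs := by
  simp [flatRuns]

lemma partCE_pullDotBar (e : Nat) (x : String) (l : List String) (h1 : x ≠ "O") (h2 : x ≠ ".") :
    partCE 0 e (x :: l) = List.replicate e "." ++ partCE 0 0 (x :: l) := by
  rw [partCE_consBar _ _ _ _ h1 h2, partCE_consBar _ _ _ _ h1 h2]
  simp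

def allPos (rs : List (String × Nat)) : Prop := ∀ p ∈ rs, 1 ≤ p.2

lemma noDD_tail (p : String × Nat) (rs : List (String × Nat)) (h : noDD (p :: rs)) : noDD rs := by
  match p, rs with
  | _, [] => trivial
  | (x, n), (y, m) :: r => exact h.2

lemma noDD_dot_any (f g : Nat) (r : List (String × Nat)) (h : noDD ((".", f) :: r)) :
    noDD ((".", g) :: r) := by
  match r with
  | [] => trivial
  | (y, m) :: t => exact h

lemma rollRuns_eq_partCE : ∀ rs : List (String × Nat), noDD rs → allPos rs →
    rollRuns rs = partCE 0 0 (flatRuns rs) := by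
  intro rs
  induction rs using rollRuns.induct with
  | case1 => intro _ _; simp [rollRuns, flatRuns, partCE]
  | case2 f n rest2 ihm =>
    intro h hp
    match rest2, ihm with
    | (z, m) :: rest3, ⟨ih1, ih2⟩ =>
      have h3 : noDD ((z, m) :: rest3) := noDD_tail _ _ (noDD_tail _ _ h)
      by_cases hz : z = "."
      · subst hz
        have hnd : noDD ((".", f + m) :: rest3) := noDD_dot_any m (f + m) rest3 h3
        have hpp : allPos ((".", f + m) :: rest3) := by
          intro p hmem
          simp only [List.mem_cons] at hmem
          rcases hmem with rfl | hmem
          · have h1 := hp (".", m) (by simp)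
            simp only at h1 ⊢
            omega
          · exact hp p (by simp [hmem])
        conv_rhs => rw [flatRuns_cons, flatRuns_cons, flatRuns_cons,
          partCE_repDot, partCE_repO, partCE_repDot, partCE_pullO]
        rw [show rollRuns ((".", f) :: ("O", n) :: (".", m) :: rest3)
              = strTimes "O" n ++ rollRuns ((".", f + m) :: rest3) from by
            simp [rollRuns]]
        rw [ih1 hnd hpp]
        conv_lhs => rw [flatRuns_cons, partCE_repDot]
        rw [strTimes_O, show 0 + (f + m) = 0 + f + m by ring]
      · have hnd : noDD ((".", f) :: (z, m) :: rest3) := by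
          refine ⟨?_, h3⟩
          rintro ⟨-, hzdot⟩
          exact hz hzdot
        have hpp : allPos ((".", f) :: (z, m) :: rest3) := by
          intro p hmem
          simp only [List.mem_cons] at hmem
          rcases hmem with rfl | rfl | hmem
          · exact hp (".", f) (by simp)
          · exact hp (z, m) (by simp)
          · exact hp p (by simp [hmem])
        conv_rhs => rw [flatRuns_cons, flatRuns_cons,
          partCE_repDot, partCE_repO, partCE_pullO]
        rw [show rollRuns ((".", f) :: ("O", n) :: (z, m) :: rest3)
              = strTimes "O" n ++ rollRuns ((".", f) :: (z, m) :: rest3) from by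
            simp [rollRuns, hz]]
        rw [ih2 hnd hpp]
        conv_lhs => rw [flatRuns_cons, partCE_repDot]
        rw [strTimes_O]
    | [], ih0 =>
      conv_rhs => rw [flatRuns_cons, flatRuns_cons, partCE_repDot, partCE_repO, partCE_pullO]
      rw [show rollRuns [(".", f), ("O", n)] = strTimes "O" n ++ rollRuns [(".", f)] from by
          simp [rollRuns]]
      rw [ih0 trivial (by
        intro p hmem
        simp only [List.mem_cons, List.not_mem_nil, or_false] at hmem
        subst hmem
        exact hp (".", f) (by simp))]
      conv_lhs => rw [flatRuns_cons, partCE_repDot]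
      rw [strTimes_O]
  | case3 f b c d hbO ih =>
    intro h hp
    have hbd : b ≠ "." := by
      rintro rfl
      exact h.1 ⟨rfl, rfl⟩
    have hc : 1 ≤ c := hp (b, c) (by simp)
    obtain ⟨c', rfl⟩ : ∃ c', c = c' + 1 := ⟨c - 1, by omega⟩
    conv_rhs => rw [flatRuns_cons, partCE_repDot, flatRuns_cons, List.replicate_succ,
      List.cons_append, partCE_pullDotBar _ _ _ hbO hbd]
    rw [show rollRuns ((".", f) :: (b, c' + 1) :: d)
          = strTimes "." f ++ rollRuns ((b, c' + 1) :: d) from by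
        rw [rollRuns.eq_def]
        simp [hbO]]
    rw [ih (noDD_tail _ _ h) (fun p hmem => hp p (List.mem_cons_of_mem _ hmem))]
    conv_lhs => rw [flatRuns_cons]
    rw [strTimes_dot, List.replicate_succ, List.cons_append]
    simp
  | case4 a =>
    intro h hp
    rw [show rollRuns [(".", a)] = strTimes "." a from by simp [rollRuns]]
    rw [flatRuns_cons, show flatRuns ([] : List (String × Nat)) = [] from rfl,
      List.append_nil]
    have hd := partCE_repDot ([] : List String) a 0 0
    simp only [List.append_nil] at hd
    rw [hd]
    simp [partCE, strTimes_dot]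
  | case5 x f c hx ih =>
    intro h hp
    rw [show rollRuns ((x, f) :: c) = strTimes x f ++ rollRuns c from by
        rw [rollRuns.eq_def]
        simp [hx]]
    rw [ih (noDD_tail _ _ h) (fun p hmem => hp p (List.mem_cons_of_mem _ hmem))]
    by_cases hxO : x = "O"
    · subst hxO
      rw [flatRuns_cons, partCE_repO, partCE_pullO, strTimes_O]
    · rw [flatRuns_cons, partCE_repBar x hxO hx]

lemma flatRuns_append (a b : List (String × Nat)) :
    flatRuns (a ++ b) = flatRuns a ++ flatRuns b := by
  simp [flatRuns]

lemma csGo_flat (xs : List String) : ∀ (last : String) (n : Nat) acc,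
    flatRuns (csGo xs last n acc) = flatRuns acc ++ List.replicate n last ++ xs := by
  induction xs with
  | nil =>
    intro last n acc
    simp [csGo, flatRuns_append, flatRuns_cons, flatRuns]
  | cons x t ih =>
    intro last n acc
    by_cases hx : x = last
    · rw [csGo, if_pos hx, ih]
      subst hx
      rw [List.replicate_succ']
      simp
    · rw [csGo, if_neg hx, ih, flatRuns_append, flatRuns_cons]
      simp [flatRuns]

lemma csGo_chain (xs : List String) : ∀ (last : String) (n : Nat) acc,
    List.IsChain (fun a b : String × Nat => a.1 ≠ b.1) (acc ++ [(last, n)]) →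
    List.IsChain (fun a b : String × Nat => a.1 ≠ b.1) (csGo xs last n acc) := by
  induction xs with
  | nil => intro last n acc h; simpa [csGo] using h
  | cons x t ih =>
    intro last n acc h
    by_cases hx : x = last
    · rw [csGo, if_pos hx]
      apply ih
      have : ∀ m : Nat, List.IsChain (fun a b : String × Nat => a.1 ≠ b.1) (acc ++ [(last, m)]) := by
        intro m
        rw [List.isChain_append] at h ⊢
        refine ⟨h.1, List.isChain_singleton _, ?_⟩
        intro p hp q hq
        simp at hq
        subst hq
        exact h.2.2 p hp (last, n) (by simp)
      exact this (n + 1)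
    · rw [csGo, if_neg hx]
      apply ih
      rw [List.isChain_append]
      refine ⟨h, List.isChain_singleton _, ?_⟩
      intro p hp q hq
      simp at hq
      subst hq
      have hpl : p = (last, n) := by symm; simpa using hp
      subst hpl
      simp only [ne_eq]
      intro hlast
      exact hx hlast.symm

lemma csGo_pos (xs : List String) : ∀ (last : String) (n : Nat) acc,
    1 ≤ n → allPos acc → allPos (csGo xs last n acc) := by
  induction xs with
  | nil =>
    intro last n acc hn hacc p hp
    simp [csGo] at hp
    rcases hp with hp | rfl
    · exact hacc p hp
    · exact hn
  | cons x t ih =>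
    intro last n acc hn hacc
    by_cases hx : x = last
    · rw [csGo, if_pos hx]
      exact ih _ _ _ (by omega) hacc
    · rw [csGo, if_neg hx]
      refine ih _ _ _ le_rfl ?_
      intro p hp
      simp at hp
      rcases hp with hp | rfl
      · exact hacc p hp
      · exact hn

lemma noDD_of_chain : ∀ rs : List (String × Nat),
    List.IsChain (fun a b : String × Nat => a.1 ≠ b.1) rs → noDD rs := by
  intro rs
  induction rs with
  | nil => intro _; trivial
  | cons p t ih =>
    intro h
    match p, t with
    | _, [] => trivial
    | (x, k), (y, m) :: r =>
      refine ⟨?_, ih ((List.isChain_cons_cons.mp h)).2⟩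
      rintro ⟨rfl, rfl⟩
      exact ((List.isChain_cons_cons.mp h)).1 rfl

lemma roll_eq (s : List String) : rollA s = rollB s := by
  match s with
  | [] => rfl
  | x :: xs =>
    have hflat : flatRuns (countSeries (x :: xs)) = x :: xs := by
      rw [countSeries, csGo_flat]
      simp [flatRuns]
    have hchain : List.IsChain (fun a b : String × Nat => a.1 ≠ b.1) (countSeries (x :: xs)) := by
      rw [countSeries]
      exact csGo_chain _ _ _ _ (by simp)
    have hpos : allPos (countSeries (x :: xs)) := by
      rw [countSeries]
      exact csGo_pos _ _ _ _ le_rfl (by intro p hp; simp at hp)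
    rw [rollA, rollB, rbGo_eq_partCE, List.nil_append,
      rollRuns_eq_partCE _ (noDD_of_chain _ hchain) hpos, hflat]

lemma rollAB : rollA = rollB := funext roll_eq

lemma cycle_eq : cycleA = cycleB := by
  funext g
  rw [cycleA, cycleB, upA, upB, downA, downB, leftA, leftB, rightA, rightB, rollAB]

lemma sim_eq : ∀ (n : Nat) g ls, simA n g ls = simB n g ls := by
  intro n
  induction n with
  | zero => intro g ls; rfl
  | succ k ih =>
    intro g ls
    rw [simA, simB, cycle_eq, ih]

lemma sim_len : ∀ (n : Nat) g ls, ((simB n g ls).2).length = ls.length + n := by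
  intro n
  induction n with
  | zero => intro g ls; simp [simB]
  | succ k ih =>
    intro g ls
    rw [simB, ih]
    simp
    omega

-- ===== proofs: cycle detection =====
def condP (s : List Int) (cl k : Nat) : Prop := s.getD k 0 = s.getD (k + cl) 0

def PcP (s : List Int) (st cl : Nat) : Prop := ∀ k, st ≤ k → k + cl < s.length → condP s cl k

lemma pyGet_in (s : List Int) (i : Nat) (h : i < s.length) :
    PySem.List.pyGet? s ((i : Nat) : Int) = some (s.getD i 0) := by
  rw [PySem.List.pyGet?_natCast]
  rw [List.getElem?_eq_getElem h, List.getD_eq_getElem?_getD, List.getElem?_eq_getElem h]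
  rfl

lemma W_spec (s : List Int) (x : Int) (base cl : Nat) (hcl : 1 ≤ cl) : ∀ off,
    (whileCheckA s x base cl off = some true ∧
      (∀ o, off ≤ o → base + o * cl < s.length → s.getD (base + o * cl) 0 = x)) ∨
    (whileCheckA s x base cl off = some false ∧
      ¬(∀ o, off ≤ o → base + o * cl < s.length → s.getD (base + o * cl) 0 = x)) := by
  intro off
  induction off using whileCheckA.induct s x base cl with
  | case1 off h0 => omega
  | case2 off h0 hlt hnone =>
    rw [pyGet_in s _ hlt] at hnone
    exact absurd hnone (by simp)
  | case3 off h0 hlt v hsome hne =>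
    right
    constructor
    · rw [whileCheckA.eq_def, dif_neg h0, dif_pos hlt, hsome]
      simp [hne]
    · intro hall
      have hv : s.getD (base + off * cl) 0 = v := by
        rw [pyGet_in s _ hlt] at hsome
        exact Option.some.inj hsome
      exact hne ((hall off le_rfl hlt).symm.trans hv)
  | case4 off h0 hlt v hsome heq ih =>
    have hv : s.getD (base + off * cl) 0 = v := by
      rw [pyGet_in s _ hlt] at hsome
      exact Option.some.inj hsome
    have hxv : x = v := by
      by_contra hc
      exact heq hc
    have hstep : whileCheckA s x base cl off = whileCheckA s x base cl (off + 1) := by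
      rw [whileCheckA.eq_def, dif_neg h0, dif_pos hlt, hsome]
      simp [heq]
    rcases ih with ⟨htrue, hall⟩ | ⟨hfalse, hnall⟩
    · left
      refine ⟨hstep.trans htrue, ?_⟩
      intro o ho hlen
      rcases Nat.eq_or_lt_of_le ho with rfl | ho'
      · rw [hv, hxv]
      · exact hall o ho' hlen
    · right
      refine ⟨hstep.trans hfalse, ?_⟩
      intro hall
      exact hnall (fun o ho hlen => hall o (by omega) hlen)
  | case5 off h0 hge =>
    left
    constructor
    · rw [whileCheckA.eq_def, dif_neg h0, dif_neg hge]
    · intro o ho hlen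
      have hmul : off * cl ≤ o * cl := Nat.mul_le_mul_right cl ho
      omega

lemma IC_spec (s : List Int) (start cl : Nat) (hcl : 1 ≤ cl) (hsc : start + cl ≤ s.length) :
    ∀ i,
    (icGo s start cl i = some true ∧
      (∀ j, i ≤ j → j < cl → ∀ o, 1 ≤ o → start + j + o * cl < s.length →
        s.getD (start + j + o * cl) 0 = s.getD (start + j) 0)) ∨
    (icGo s start cl i = some false ∧
      ¬(∀ j, i ≤ j → j < cl → ∀ o, 1 ≤ o → start + j + o * cl < s.length →
        s.getD (start + j + o * cl) 0 = s.getD (start + j) 0)) := by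
  intro i
  induction i using icGo.induct s start cl with
  | case1 i hi hnone =>
    have : start + i < s.length := by omega
    rw [pyGet_in s _ this] at hnone
    exact absurd hnone (by simp)
  | case2 i hi x hsome hwnone =>
    rcases W_spec s x (start + i) cl hcl 1 with ⟨ht, _⟩ | ⟨hf, _⟩
    · rw [ht] at hwnone; exact absurd hwnone (by simp)
    · rw [hf] at hwnone; exact absurd hwnone (by simp)
  | case3 i hi x hsome hwfalse =>
    have hx : s.getD (start + i) 0 = x := by
      have : start + i < s.length := by omega
      rw [pyGet_in s _ this] at hsome
      exact Option.some.inj hsome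
    right
    constructor
    · rw [icGo.eq_def, if_pos hi, hsome]
      simp [hwfalse]
    · intro hall
      rcases W_spec s x (start + i) cl hcl 1 with ⟨ht, _⟩ | ⟨_, hnchain⟩
      · rw [ht] at hwfalse; exact absurd hwfalse (by simp)
      · exact hnchain (fun o ho hlen => by rw [hall i le_rfl hi o ho hlen, hx])
  | case4 i hi x hsome hwtrue ih =>
    have hx : s.getD (start + i) 0 = x := by
      have : start + i < s.length := by omega
      rw [pyGet_in s _ this] at hsome
      exact Option.some.inj hsome
    have hchain : ∀ o, 1 ≤ o → start + i + o * cl < s.length →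
        s.getD (start + i + o * cl) 0 = s.getD (start + i) 0 := by
      rcases W_spec s x (start + i) cl hcl 1 with ⟨_, hc⟩ | ⟨hf, _⟩
      · intro o ho hlen
        rw [hc o ho hlen, hx]
      · rw [hf] at hwtrue; exact absurd hwtrue (by simp)
    have hstep : icGo s start cl i = icGo s start cl (i + 1) := by
      rw [icGo.eq_def, if_pos hi, hsome]
      simp [hwtrue]
    rcases ih with ⟨ht, hall⟩ | ⟨hf, hnall⟩
    · left
      refine ⟨hstep.trans ht, ?_⟩
      intro j hj hjcl o ho hlen
      rcases Nat.eq_or_lt_of_le hj with rfl | hj'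
      · exact hchain o ho hlen
      · exact hall j hj' hjcl o ho hlen
    · right
      refine ⟨hstep.trans hf, ?_⟩
      intro hall
      exact hnall (fun j hj hjcl => hall j (by omega) hjcl)
  | case5 i hi =>
    left
    constructor
    · rw [icGo.eq_def, if_neg hi]
    · intro j hj hjcl
      omega

lemma shift_iff (s : List Int) (start cl : Nat) (hcl : 1 ≤ cl) :
    (∀ j, 0 ≤ j → j < cl → ∀ o, 1 ≤ o → start + j + o * cl < s.length →
      s.getD (start + j + o * cl) 0 = s.getD (start + j) 0) ↔ PcP s start cl := by
  constructor
  · intro hch k hk hlen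
    have haux : ∀ o j, j < cl → k = start + j + o * cl → condP s cl k := by
      intro o j hjcl hdecomp
      rcases Nat.eq_zero_or_pos o with rfl | hopos
      · have hk' : k = start + j := by omega
        have := hch j (by omega) hjcl 1 le_rfl (by omega : start + j + 1 * cl < s.length)
        rw [condP, hk']
        rw [show start + j + cl = start + j + 1 * cl by ring]
        exact this.symm
      · have h1 : s.getD k 0 = s.getD (start + j) 0 := by
          rw [hdecomp]
          exact hch j (by omega) hjcl o hopos (by omega)
        have h2 : s.getD (k + cl) 0 = s.getD (start + j) 0 := by
          rw [show k + cl = start + j + (o + 1) * cl by rw [hdecomp]; ring]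
          exact hch j (by omega) hjcl (o + 1) (by omega)
            (by rw [show start + j + (o + 1) * cl = k + cl by rw [hdecomp]; ring]; omega)
        rw [condP, h1, h2]
    have hdm := Nat.div_add_mod (k - start) cl
    refine haux ((k - start) / cl) ((k - start) % cl) (Nat.mod_lt _ (by omega)) ?_
    have hcomm : ((k - start) / cl) * cl = cl * ((k - start) / cl) := Nat.mul_comm _ _
    omega
  · intro hpc j _ hjcl o ho
    induction o, ho using Nat.le_induction with
    | base =>
      intro hlen
      have := hpc (start + j) (by omega) (by omega)
      rw [condP] at this
      rw [show start + j + 1 * cl = start + j + cl by ring]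
      exact this.symm
    | succ o ho ih =>
      intro hlen
      have hlen' : start + j + o * cl + cl < s.length := by
        rw [show start + j + o * cl + cl = start + j + (o + 1) * cl by ring]
        omega
      have hco := hpc (start + j + o * cl) (by omega) hlen'
      rw [condP] at hco
      rw [show start + j + (o + 1) * cl = start + j + o * cl + cl by ring]
      rw [← hco]
      exact ih (by nlinarith)

lemma IC_true (s : List Int) (start cl : Nat) (hcl : 1 ≤ cl) (hsc : start + cl ≤ s.length) :
    (icGo s start cl 0 = some true ∧ PcP s start cl) ∨
    (icGo s start cl 0 = some false ∧ ¬ PcP s start cl) := by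
  rcases IC_spec s start cl hcl hsc 0 with ⟨ht, hall⟩ | ⟨hf, hnall⟩
  · left
    exact ⟨ht, (shift_iff s start cl hcl).mp (fun j _ => hall j (by omega))⟩
  · right
    refine ⟨hf, fun hpc => hnall ?_⟩
    intro j hj hjcl
    exact (shift_iff s start cl hcl).mpr hpc j (by omega) hjcl

lemma CL_none (s : List Int) (hL : s.length = 1000) (start : Nat) (hst : start ≤ 501) :
    ∀ cl, 1 ≤ cl → (∀ c, cl ≤ c → c < 500 → ¬ PcP s start c) →
    clLoopA s start cl = some none := by
  intro cl
  induction cl using clLoopA.induct s start with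
  | case1 cl hlt hnone =>
    intro hcl hno
    have hlt' : cl < 500 := by omega
    rcases IC_true s start cl hcl (by omega) with ⟨ht, _⟩ | ⟨hf, _⟩
    · rw [ht] at hnone; exact absurd hnone (by simp)
    · rw [hf] at hnone; exact absurd hnone (by simp)
  | case2 cl hlt htrue =>
    intro hcl hno
    have hlt' : cl < 500 := by omega
    rcases IC_true s start cl hcl (by omega) with ⟨_, hpc⟩ | ⟨hf, _⟩
    · exact absurd hpc (hno cl le_rfl hlt')
    · rw [hf] at htrue; exact absurd htrue (by simp)
  | case3 cl hlt hfalse ih =>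
    intro hcl hno
    rw [clLoopA.eq_def, if_pos hlt, hfalse]
    exact ih (by omega) (fun c hc => hno c (by omega))
  | case4 cl hge =>
    intro _ _
    rw [clLoopA.eq_def, if_neg hge]

lemma CL_found (s : List Int) (hL : s.length = 1000) (start : Nat) (hst : start ≤ 501)
    (c : Nat) (hc1 : 1 ≤ c) (hc5 : c < 500) (hpc : PcP s start c) :
    ∀ cl, 1 ≤ cl → cl ≤ c → (∀ c', cl ≤ c' → c' < c → ¬ PcP s start c') →
    clLoopA s start cl = some (some (start, c)) := by
  intro cl
  induction cl using clLoopA.induct s start with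
  | case1 cl hlt hnone =>
    intro hcl hlc hmin
    rcases IC_true s start cl hcl (by omega) with ⟨ht, _⟩ | ⟨hf, _⟩
    · rw [ht] at hnone; exact absurd hnone (by simp)
    · rw [hf] at hnone; exact absurd hnone (by simp)
  | case2 cl hlt htrue =>
    intro hcl hlc hmin
    have hcc : cl = c := by
      by_contra hne
      have hclc : cl < c := by omega
      rcases IC_true s start cl hcl (by omega) with ⟨_, hpcc⟩ | ⟨hf, _⟩
      · exact hmin cl le_rfl hclc hpcc
      · rw [hf] at htrue; exact absurd htrue (by simp)
    subst hcc
    rw [clLoopA.eq_def, if_pos hlt, htrue]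
  | case3 cl hlt hfalse ih =>
    intro hcl hlc hmin
    have hne : cl ≠ c := by
      intro rfl'
      subst rfl'
      rcases IC_true s start cl hcl (by omega) with ⟨ht, _⟩ | ⟨_, hnpc⟩
      · rw [ht] at hfalse; exact absurd hfalse (by simp)
      · exact hnpc hpc
    rw [clLoopA.eq_def, if_pos hlt, hfalse]
    exact ih (by omega) (by omega) (fun c' hc' => hmin c' (by omega))
  | case4 cl hge =>
    intro hcl hlc hmin
    rw [hL] at hge
    omega

def FoundSet (s : List Int) (st : Nat) : Prop := ∃ c, 1 ≤ c ∧ c < 500 ∧ PcP s st c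

lemma ST_lem (s : List Int) (hL : s.length = 1000) (S C : Nat) (hS : S ≤ 501)
    (hC1 : 1 ≤ C) (hC5 : C < 500) (hpc : PcP s S C)
    (hCmin : ∀ c, 1 ≤ c → c < C → ¬ PcP s S c)
    (hSmin : ∀ st, st < S → ¬ FoundSet s st) :
    ∀ st, st ≤ S → stLoopA s st = some ((S : Int), (C : Int)) := by
  intro st hstS
  induction st using stLoopA.induct s with
  | case1 st hlt hnone =>
    rcases Nat.eq_or_lt_of_le hstS with rfl | hlt'
    · rw [CL_found s hL st hS C hC1 hC5 hpc 1 le_rfl hC1 (fun c' hc' hcc => hCmin c' hc' hcc)] at hnone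
      exact absurd hnone (by simp)
    · rw [CL_none s hL st (by omega) 1 le_rfl
        (fun c hc hc5 hp => hSmin st hlt' ⟨c, hc, hc5, hp⟩)] at hnone
      exact absurd hnone (by simp)
  | case2 st hlt a b hsome =>
    rcases Nat.eq_or_lt_of_le hstS with rfl | hlt'
    · have heq := CL_found s hL st hS C hC1 hC5 hpc 1 le_rfl hC1
        (fun c' hc' hcc => hCmin c' hc' hcc)
      rw [stLoopA.eq_def, if_pos hlt, heq]
    · rw [CL_none s hL st (by omega) 1 le_rfl
        (fun c hc hc5 hp => hSmin st hlt' ⟨c, hc, hc5, hp⟩)] at hsome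
      exact absurd (Option.some.inj hsome) (by simp)
  | case3 st hlt hsnone ih =>
    rcases Nat.eq_or_lt_of_le hstS with rfl | hlt'
    · rw [CL_found s hL st hS C hC1 hC5 hpc 1 le_rfl hC1 (fun c' hc' hcc => hCmin c' hc' hcc)] at hsnone
      exact absurd (Option.some.inj hsnone) (by simp)
    · rw [stLoopA.eq_def, if_pos hlt, hsnone]
      exact ih (by omega)
  | case4 st hge =>
    rw [hL] at hge
    omega

lemma detectA_eq (s : List Int) (hL : s.length = 1000) (S C : Nat) (hS : S ≤ 501)
    (hC1 : 1 ≤ C) (hC5 : C < 500) (hpc : PcP s S C)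
    (hCmin : ∀ c, 1 ≤ c → c < C → ¬ PcP s S c)
    (hSmin : ∀ st, st < S → ¬ FoundSet s st) :
    detectCycleA s = some ((S : Int), (C : Int)) :=
  ST_lem s hL S C hS hC1 hC5 hpc hCmin hSmin 0 (by omega)

-- msGo s cl kk kk returns the least start from which cond holds up to kk
lemma msGo_char (s : List Int) (cl : Nat) : ∀ kk,
    (∀ j, msGo s cl kk kk ≤ j → j < kk → condP s cl j) ∧
    (msGo s cl kk kk = 0 ∨ ¬ condP s cl (msGo s cl kk kk - 1)) ∧
    msGo s cl kk kk ≤ kk := by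
  intro kk
  induction kk with
  | zero => exact ⟨fun j _ hj => absurd hj (by omega), Or.inl rfl, le_rfl⟩
  | succ k ih =>
    by_cases hmis : s.getD k 0 ≠ s.getD (k + cl) 0
    · rw [show msGo s cl (k + 1) (k + 1) = k + 1 from by rw [msGo, if_pos hmis]]
      exact ⟨fun j h1 h2 => by omega, Or.inr (by simpa [condP] using hmis), le_rfl⟩
    · rw [show msGo s cl (k + 1) (k + 1) = msGo s cl k k from by rw [msGo, if_neg hmis]]
      rw [not_not] at hmis
      refine ⟨?_, ih.2.1, by omega⟩
      intro j h1 h2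
      rcases Nat.lt_or_ge j k with hj | hj
      · exact ih.1 j h1 hj
      · have : j = k := by omega
        subst this
        exact hmis

lemma mdef_le (s : List Int) (cl kk : Nat) : msGo s cl kk kk ≤ kk := (msGo_char s cl kk).2.2

-- least-start characterisation: m cl ≤ st ↔ cond holds on [st, kk)
lemma msGo_le_iff (s : List Int) (cl : Nat) (kk st : Nat) (hst : st ≤ kk) :
    msGo s cl kk kk ≤ st ↔ ∀ j, st ≤ j → j < kk → condP s cl j := by
  constructor
  · intro hle j h1 h2
    exact (msGo_char s cl kk).1 j (by omega) h2
  · intro hall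
    by_contra hgt
    push_neg at hgt
    rcases (msGo_char s cl kk).2.1 with h0 | hnc
    · omega
    · exact hnc (hall (msGo s cl kk kk - 1) (by omega) (by
        have := (msGo_char s cl kk).2.2
        omega))

def mm (s : List Int) (cl : Nat) : Nat := msGo s cl (s.length - cl) (s.length - cl)

lemma DB_char (s : List Int) (hL : s.length = 1000) (cF : Nat) (hcF1 : 1 ≤ cF) (hcF5 : cF < 500)
    (hmin : ∀ c, 1 ≤ c → c < 500 → mm s cF ≤ mm s c)
    (hstrict : ∀ c, 1 ≤ c → c < cF → mm s cF < mm s c) :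
    ∀ d cl best, cl + d = 500 →
    (∃ c', 1 ≤ c' ∧ c' < cl ∧ best = ((mm s c' : Int), (c' : Int)) ∧
      (∀ c, 1 ≤ c → c < cl → mm s c' ≤ mm s c) ∧ (∀ c, 1 ≤ c → c < c' → mm s c' < mm s c)) →
    detBGo s cl best = ((mm s cF : Int), (cF : Int)) := by
  intro d
  induction d with
  | zero =>
    intro cl best hcl hinv
    obtain ⟨c', h1, h2, rfl, h4, h5⟩ := hinv
    have hne : ¬ cl < s.length / 2 := by rw [hL]; omega
    rw [detBGo, if_neg hne]
    have heq : c' = cF := by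
      have ha : mm s c' ≤ mm s cF := h4 cF hcF1 (by omega)
      have hb : mm s cF ≤ mm s c' := hmin c' h1 (by omega)
      by_contra hne'
      rcases Nat.lt_or_ge c' cF with hlt | hge
      · have := hstrict c' h1 hlt
        omega
      · have : cF < c' := by omega
        have := h5 cF hcF1 this
        omega
    rw [heq]
  | succ k ih =>
    intro cl best hcl hinv
    obtain ⟨c', h1, h2, rfl, h4, h5⟩ := hinv
    have hlt : cl < s.length / 2 := by rw [hL]; omega
    rw [detBGo, if_pos hlt]
    dsimp only
    have hm : msGo s cl (s.length - cl) (s.length - cl) = mm s cl := rfl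
    by_cases hcase : mm s cl < mm s c'
    · have hcond : (((mm s c' : Int), (c' : Int)) : Int × Int).2 = -1 ∨
          ((msGo s cl (s.length - cl) (s.length - cl) : Nat) : Int) < (((mm s c' : Int), (c' : Int)) : Int × Int).1 := by
        right
        show ((msGo s cl (s.length - cl) (s.length - cl) : Nat) : Int) < ((mm s c' : Nat) : Int)
        rw [hm]
        exact_mod_cast hcase
      rw [if_pos hcond, hm]
      apply ih (cl + 1) _ (by omega)
      refine ⟨cl, ?_, by omega, rfl, ?_, ?_⟩
      · omega
      · intro c hc hccl
        rcases Nat.lt_or_ge c cl with h | h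
        · have := h4 c hc h
          omega
        · have : c = cl := by omega
          subst this
          exact le_rfl
      · intro c hc hccl
        have := h4 c hc hccl
        omega
    · have hcond : ¬((((mm s c' : Int), (c' : Int)) : Int × Int).2 = -1 ∨
          ((msGo s cl (s.length - cl) (s.length - cl) : Nat) : Int) < (((mm s c' : Int), (c' : Int)) : Int × Int).1) := by
        intro hc
        rcases hc with hc | hc
        · simp at hc
        · simp only [hm] at hc
          exact hcase (by exact_mod_cast hc)
      rw [if_neg hcond]
      apply ih (cl + 1) _ (by omega)
      refine ⟨c', h1, by omega, rfl, ?_, h5⟩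
      intro c hc hccl
      rcases Nat.lt_or_ge c cl with h | h
      · exact h4 c hc h
      · have : c = cl := by omega
        subst this
        omega

lemma detectB_eq (s : List Int) (hL : s.length = 1000) (cF : Nat) (hcF1 : 1 ≤ cF) (hcF5 : cF < 500)
    (hmin : ∀ c, 1 ≤ c → c < 500 → mm s cF ≤ mm s c)
    (hstrict : ∀ c, 1 ≤ c → c < cF → mm s cF < mm s c) :
    detectCycleB s = ((mm s cF : Int), (cF : Int)) := by
  rw [detectCycleB, detBGo, if_pos (by rw [hL]; omega : 1 < s.length / 2)]
  dsimp only
  rw [if_pos (Or.inl rfl)]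
  have h1 : ((msGo s 1 (s.length - 1) (s.length - 1) : Nat) : Int) = ((mm s 1 : Nat) : Int) := rfl
  rw [h1]
  apply DB_char s hL cF hcF1 hcF5 hmin hstrict 498 2 _ (by omega)
  exact ⟨1, le_rfl, by omega, by norm_num, fun c hc hcc => by
    have : c = 1 := by omega
    subst this
    exact le_rfl, fun c hc hcc => by omega⟩

lemma Pc_iff (s : List Int) (hL : s.length = 1000) (st cl : Nat) (hst : st ≤ 1000 - cl)
    (hcl : cl ≤ 1000) : PcP s st cl ↔ mm s cl ≤ st := by
  rw [mm, hL, msGo_le_iff s cl (1000 - cl) st hst]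
  constructor
  · intro h j h1 h2
    exact h j h1 (by omega)
  · intro h k h1 h2
    rw [hL] at h2
    exact h k h1 (by omega)

lemma detect_pair (s : List Int) (hL : s.length = 1000) :
    ∃ S C : Nat, 1 ≤ C ∧ C < 500 ∧ S + C ≤ 1000 ∧
      detectCycleA s = some ((S : Int), (C : Int)) ∧
      detectCycleB s = ((S : Int), (C : Int)) := by
  obtain ⟨c0, hc0mem, hc0min⟩ :=
    Finset.exists_min_image (Finset.Icc 1 499) (mm s) ⟨1, by simp⟩
  simp only [Finset.mem_Icc] at hc0mem
  have hQ : ∃ c, 1 ≤ c ∧ c < 500 ∧ mm s c ≤ mm s c0 := ⟨c0, hc0mem.1, by omega, le_rfl⟩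
  classical
  obtain ⟨cF, hcFspec, hcFmin⟩ :
      ∃ cF, (1 ≤ cF ∧ cF < 500 ∧ mm s cF ≤ mm s c0) ∧
        ∀ c < cF, ¬(1 ≤ c ∧ c < 500 ∧ mm s c ≤ mm s c0) :=
    ⟨Nat.find hQ, Nat.find_spec hQ, fun c hc => Nat.find_min hQ hc⟩
  obtain ⟨hcF1, hcF5, hcFle⟩ := hcFspec
  have hmin : ∀ c, 1 ≤ c → c < 500 → mm s cF ≤ mm s c := by
    intro c h1 h5
    exact le_trans hcFle (hc0min c (Finset.mem_Icc.mpr ⟨h1, by omega⟩))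
  have hstrict : ∀ c, 1 ≤ c → c < cF → mm s cF < mm s c := by
    intro c h1 hc
    have hnq := hcFmin c hc
    simp only [not_and, not_le] at hnq
    have h2 := hnq h1 (by omega)
    have h3 := hc0min c (Finset.mem_Icc.mpr ⟨h1, by omega⟩)
    omega
  have hmle : ∀ c, mm s c ≤ 1000 - c := by
    intro c
    have h : mm s c ≤ s.length - c := mdef_le s c (s.length - c)
    omega
  refine ⟨mm s cF, cF, hcF1, hcF5, by have := hmle cF; omega, ?_, ?_⟩
  · apply detectA_eq s hL _ _ ?_ hcF1 hcF5 ?_ ?_ ?_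
    · have h499 := hmin 499 (by omega) (by omega)
      have := hmle 499
      omega
    · exact (Pc_iff s hL _ cF (hmle cF) (by omega)).mpr le_rfl
    · intro c h1 hc hpc
      have hmc := (Pc_iff s hL _ c (by have := hmle cF; omega) (by omega)).mp hpc
      have := hstrict c h1 hc
      omega
    · intro st hst hfs
      obtain ⟨c, h1, h5, hpc⟩ := hfs
      have h499 := hmin 499 (by omega) (by omega)
      have h4 := hmle 499
      have hmc := (Pc_iff s hL st c (by omega) (by omega)).mp hpc
      have := hmin c h1 h5
      omega
  · exact detectB_eq s hL cF hcF1 hcF5 hmin hstrict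

lemma elem_take_drop (ld : List Int) (S C j : Nat) (hj : j < C) :
    ((ld.drop S).take C)[j]? = ld[S + j]? := by
  rw [List.getElem?_take_of_lt hj, List.getElem?_drop]

lemma emod_sub_one_of_ne (a b : Int) (hb : 0 < b) (h : a % b ≠ 0) :
    (a - 1) % b = a % b - 1 := by
  have hge := Int.emod_nonneg a (by omega : b ≠ 0)
  have hlt := Int.emod_lt_of_pos a hb
  have hb2 : 2 ≤ b := by
    by_contra hc
    have hb1 : b = 1 := by omega
    rw [hb1, Int.emod_one] at h
    exact h rfl
  rw [Int.sub_emod, show (1 : Int) % b = 1 from Int.emod_eq_of_lt (by omega) (by omega),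
    Int.emod_eq_of_lt (by omega) (by omega)]

lemma emod_sub_one_of_zero (a b : Int) (hb : 0 < b) (h : a % b = 0) :
    (a - 1) % b = b - 1 := by
  obtain ⟨q, rfl⟩ := Int.dvd_of_emod_eq_zero h
  rw [show b * q - 1 = (b - 1) + (q - 1) * b by ring, Int.add_mul_emod_self_right _ _ _,
    Int.emod_eq_of_lt (by omega) (by omega)]

lemma FIN (ld : List Int) (S C : Nat) (hL : ld.length = 1000) (hC1 : 1 ≤ C) (hC5 : C < 500)
    (hSC : S + C ≤ 1000) :
    (PySem.List.pyGet?
        (PySem.List.slice (PySem.List.slice ld (some (S : Int)) none) none (some (C : Int)))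
        (PySem.Int.mod (1000000000 - (S : Int)) (C : Int) - 1)).getD 0
    = (PySem.List.pyGet? ld
        ((S : Int) + PySem.Int.mod ((1000000000 : Int) - (S : Int) - 1) (C : Int))).getD 0 := by
  rw [PySem.List.slice_from_natCast, PySem.List.slice_to_natCast]
  have hCpos : (0 : Int) < (C : Int) := by exact_mod_cast hC1
  rw [PySem.Int.mod_eq_emod_of_pos hCpos, PySem.Int.mod_eq_emod_of_pos hCpos]
  have hlen2 : ((ld.drop S).take C).length = C := by
    simp [hL]
    omega
  have hrb := Int.emod_nonneg (1000000000 - (S : Int)) (by omega : (C : Int) ≠ 0)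
  have hrlt := Int.emod_lt_of_pos (1000000000 - (S : Int)) hCpos
  have hrb' := Int.emod_nonneg (1000000000 - (S : Int) - 1) (by omega : (C : Int) ≠ 0)
  have hrlt' := Int.emod_lt_of_pos (1000000000 - (S : Int) - 1) hCpos
  have hdm := Int.ediv_add_emod (1000000000 - (S : Int)) (C : Int)
  by_cases hr : (1000000000 - (S : Int)) % (C : Int) = 0
  · -- index is -1: Python wraps to the last element
    have hm1 : (1000000000 - (S : Int) - 1) % (C : Int) = (C : Int) - 1 :=
      emod_sub_one_of_zero _ _ hCpos hr
    rw [hr, hm1]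
    rw [show (0 : Int) - 1 = -1 by ring]
    rw [PySem.List.pyGet?_neg_one]
    rw [List.getLast?_eq_getElem?, hlen2]
    rw [elem_take_drop ld S C (C - 1) (by omega)]
    rw [show (S : Int) + ((C : Int) - 1) = ((S + (C - 1) : Nat) : Int) by push_cast; omega]
    rw [PySem.List.pyGet?_natCast]
  · have hm1 : (1000000000 - (S : Int) - 1) % (C : Int)
        = (1000000000 - (S : Int)) % (C : Int) - 1 :=
      emod_sub_one_of_ne _ _ hCpos hr
    rw [hm1]
    set r : Int := (1000000000 - (S : Int)) % (C : Int) with hrdef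
    have hj : r - 1 = (((r.toNat - 1 : Nat)) : Int) := by omega
    rw [hj, PySem.List.pyGet?_natCast]
    rw [show (S : Int) + (((r.toNat - 1 : Nat)) : Int) = ((S + (r.toNat - 1) : Nat) : Int) by push_cast; omega]
    rw [PySem.List.pyGet?_natCast]
    rw [elem_take_drop ld S C (r.toNat - 1) (by omega)]

lemma part2_eq (lines : List (List String)) : part2 lines = part2_alt lines := by
  rw [part2, part2_alt, sim_eq]
  have hL : ((simB 1000 lines []).2).length = 1000 := by
    rw [sim_len]
    rfl
  obtain ⟨S, C, hC1, hC5, hSC, hA, hB⟩ := detect_pair _ hL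
  rw [hA, hB]
  exact FIN _ S C hL hC1 hC5 hSC

-- ===== VERDICT (by name: the statement is the Claim_ definition above) =====
theorem part2_spec : Claim_equal_part2 := by
  intro lines _
  show part2 lines = part2_alt lines
  exact part2_eq lines
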